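-- pv_equiv track=rewrite | github.com/Nordlig/txt2APA_Converter | biblio.py | procesar_autores
-- ===== SOURCE A (Python) =====
-- prefijos = ["de la", "de las", "de los", "del", "di", "della", "da", "de", "du", "des","e","van der","van de", "van den"]
--
-- def capitalizar_primera_y_tercera_palabra(apellido):
--     partes = apellido.split()
--     if not '-' in partes[2]:
--         partes[0] = partes[0].capitalize()
--         partes[1] = partes[1].lower()
--         partes[2] = partes[2].capitalize()  # Capitaliza la tercera palabra
--
--     return ' '.join(partes)
--
-- def format_iniciales(iniciales):
--     # Asumiendo que quieres formatear las iniciales con puntos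
--     return '.'.join(iniciales) + '.'
--
-- def procesar_autores(autores):
--
--     excepciones_mac_minusculas = [
--         "Macmillan", "Macgregor", "Macfarlane", "Macpherson", "Mackenzie", "Macleod", "Macintyre", "Macdonald",
--         "Macintosh", "Macdougall", "Maccallum", "Macalister", "Macadam", "Macarthur", "Macbeth", "Macbeth",
--         "Macquarie", "Maclachlan", "Macgillivray", "Maclean", "Maccabees", "Maccarthy", "Maccoy",
--         "Macneil", "Macnichol", "Macnicol", "Macrory", "Maclaren", "Macduff", "Macewan", "Maceachern"
--     ]
--
--     resultados = []
--     partes = autores.split()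
--     apellido_actual = []
--     i = 0
--     buffer = ""
--
--     while i < len(partes):
--         # Verificar si es "[Anonymous]"
--         if partes[i] == "[Anonymous]":
--             resultados.append(f"[Anonymous]")
--             break
--
--         # Acumulación en el buffer
--         if buffer:
--             buffer += " "
--         buffer += partes[i]
--
--         # Verificar si la parte actual termina en coma
--         if partes[i].endswith(','):
--             apellido = buffer[:-1]  # Elimina la coma final
--             # Verificar si el apellido contiene algún prefijo
--             if any(apellido.lower().startswith(prefijo + " ") for prefijo in prefijos):
--                 tros = apellido.split()
--                 if len(tros) > 2:
--                     apellido = capitalizar_primera_y_tercera_palabra(apellido)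
--                     apellido_actual.append(apellido)
--                 else:
--                     apellido_actual.append(apellido.title())
--
--             elif apellido.upper().startswith("MAC") and apellido.capitalize() in excepciones_mac_minusculas:
--                 apellido_actual.append(apellido.capitalize())
--             elif apellido.upper().startswith("MAC"):
--                 apellido_actual.append("Mac" + apellido[3:].capitalize())
--             elif apellido.upper().startswith("MC"):
--                 apellido_actual.append("Mc" + apellido[2:].capitalize())
--
--             elif apellido.startswith("O'"):
--                 apellido_actual.append(apellido)
--
--             elif "-" in apellido:
--                 apellido_actual.append(apellido)
--
--             else:
--                 apellido_actual.append(apellido.title())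
--
--             # Limpiar el buffer para el siguiente apellido
--             buffer = ""
--             i += 1
--
--             # Manejo de iniciales
--             if i < len(partes) and not partes[i].endswith(','):
--                 iniciales = partes[i]
--                 iniciales_formateadas = format_iniciales(iniciales)
--                 nombre_completo = ' '.join(apellido_actual)
--                 resultados.append(f"{nombre_completo}, {iniciales_formateadas}")
--                 apellido_actual = []
--                 i += 1
--             else:
--                 nombre_completo = ' '.join(apellido_actual)
--                 resultados.append(f"{nombre_completo} ")
--                 apellido_actual = []
--         else:
--             #apellido_actual.append(buffer)
--             i += 1
--
--     # Manejar el caso final si queda algo en el buffer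
--     if apellido_actual:
--         nombre_completo = ' '.join(apellido_actual)
--         resultados.append(f"{nombre_completo} ")
--
--     return resultados
-- ===== SOURCE B (Python) =====
-- # B: two-phase re-implementation — phase 1 splits the token stream into author
-- # records (surname buffer, optional initials token, or an [Anonymous] marker that
-- # stops the scan), phase 2 maps a single formatter over the records.
--
-- prefijos = ["de la", "de las", "de los", "del", "di", "della", "da", "de", "du", "des",
--             "e", "van der", "van de", "van den"]
--
-- EXCEPCIONES_MAC = [
--     "Macmillan", "Macgregor", "Macfarlane", "Macpherson", "Mackenzie", "Macleod", "Macintyre", "Macdonald",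
--     "Macintosh", "Macdougall", "Maccallum", "Macalister", "Macadam", "Macarthur", "Macbeth", "Macbeth",
--     "Macquarie", "Maclachlan", "Macgillivray", "Maclean", "Maccabees", "Maccarthy", "Maccoy",
--     "Macneil", "Macnichol", "Macnicol", "Macrory", "Maclaren", "Macduff", "Macewan", "Maceachern"
-- ]
--
--
-- def _format_apellido(ap):
--     if any(ap.lower().startswith(p + " ") for p in prefijos):
--         w = ap.split()
--         if len(w) > 2:
--             if '-' not in w[2]:
--                 return ' '.join([w[0].capitalize(), w[1].lower(), w[2].capitalize()] + w[3:])
--             return ' '.join(w)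
--         return ap.title()
--     up = ap.upper()
--     if up.startswith("MAC"):
--         cap = ap.capitalize()
--         if cap in EXCEPCIONES_MAC:
--             return cap
--         return "Mac" + ap[3:].capitalize()
--     if up.startswith("MC"):
--         return "Mc" + ap[2:].capitalize()
--     if ap.startswith("O'") or '-' in ap:
--         return ap
--     return ap.title()
--
--
-- def _render(rec):
--     if rec is None:
--         return "[Anonymous]"
--     surname, ini = rec
--     name = _format_apellido(surname)
--     if ini is None:
--         return name + " "
--     return name + ", " + ".".join(ini) + "."
--
--
-- def procesar_autores(autores):
--     tokens = autores.split()
--     # phase 1: records, each None (anonymous) or (surname, initials-token-or-None)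
--     records = []
--     buf = ""
--     k = 0
--     n = len(tokens)
--     while k < n:
--         t = tokens[k]
--         if t == "[Anonymous]":
--             records.append(None)
--             break
--         buf = t if not buf else buf + " " + t
--         k += 1
--         if t.endswith(','):
--             surname = buf[:-1]
--             buf = ""
--             if k < n and not tokens[k].endswith(','):
--                 records.append((surname, tokens[k]))
--                 k += 1
--             else:
--                 records.append((surname, None))
--     # phase 2: format each record
--     return [_render(r) for r in records]
-- ===== Notes on version B (the rewrite author's own statement) =====
-- stated objective: alternative
-- what changed: A's single fused scan (buffer + apellido_actual + inline elif formatting chain + trailing-buffer check) is replaced by two phases: a first pass that cuts the token stream into author records (surname, optional initials token, or an [Anonymous] stop marker), then a map of one format helper over the records.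
import Mathlib
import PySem

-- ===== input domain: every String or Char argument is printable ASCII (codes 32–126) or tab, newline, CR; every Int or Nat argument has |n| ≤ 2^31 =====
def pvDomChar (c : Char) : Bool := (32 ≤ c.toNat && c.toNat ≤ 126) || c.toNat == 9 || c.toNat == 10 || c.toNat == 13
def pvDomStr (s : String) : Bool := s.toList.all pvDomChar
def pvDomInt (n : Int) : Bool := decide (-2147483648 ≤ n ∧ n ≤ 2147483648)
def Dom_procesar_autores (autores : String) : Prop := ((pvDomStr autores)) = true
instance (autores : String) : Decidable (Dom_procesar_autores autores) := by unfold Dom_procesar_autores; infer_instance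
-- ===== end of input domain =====

-- B re-implements A's fused scan as two phases (token records, then a mapped formatter); return values proved equal on all inputs.


-- ===== PORT A =====
-- shared char-level builtins (no PySem primitive): str.capitalize / str.title, exact on the ASCII domain
def pyCapitalize (cs : List Char) : List Char :=
  match cs with
  | [] => []
  | c :: rest => PySem.Chars.upperChar c :: PySem.Chars.lower rest

def pyTitleGo : Bool → List Char → List Char
  | _, [] => []
  | prev, c :: rest =>
    if PySem.Chars.isalpha c then
      (if prev then PySem.Chars.lowerChar c else PySem.Chars.upperChar c) :: pyTitleGo true rest
    else c :: pyTitleGo false rest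

def pyTitle (cs : List Char) : List Char := pyTitleGo false cs

def prefijos : List String :=
  ["de la", "de las", "de los", "del", "di", "della", "da", "de", "du", "des",
   "e", "van der", "van de", "van den"]

def excepciones_mac : List String :=
  ["Macmillan", "Macgregor", "Macfarlane", "Macpherson", "Mackenzie", "Macleod", "Macintyre", "Macdonald",
   "Macintosh", "Macdougall", "Maccallum", "Macalister", "Macadam", "Macarthur", "Macbeth", "Macbeth",
   "Macquarie", "Maclachlan", "Macgillivray", "Maclean", "Maccabees", "Maccarthy", "Maccoy",
   "Macneil", "Macnichol", "Macnicol", "Macrory", "Maclaren", "Macduff", "Macewan", "Maceachern"]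

-- indexing (partes[0..2]) is in range at the only call site (len(tros) > 2); Python raises on shorter input
def capitalizar_primera_y_tercera_palabra (apellido : List Char) : List Char :=
  let partes := PySem.Chars.split₀ apellido
  let partes :=
    if ¬ PySem.Chars.isIn ['-'] (partes.getD 2 []) then
      (((partes.set 0 (pyCapitalize (partes.getD 0 []))).set 1
          (PySem.Chars.lower (partes.getD 1 []))).set 2 (pyCapitalize (partes.getD 2 [])))
    else partes
  PySem.Chars.join [' '] partes

def format_iniciales (iniciales : List Char) : List Char :=
  PySem.Chars.join ['.'] (iniciales.map (fun c => [c])) ++ ['.']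

-- A's inline if/elif formatting chain (the value appended to apellido_actual)
def pyA_formatChain (apellido : List Char) : List Char :=
  if prefijos.any (fun pre => PySem.Chars.startswith (PySem.Chars.lower apellido) (pre.toList ++ [' '])) then
    let tros := PySem.Chars.split₀ apellido
    if 2 < tros.length then capitalizar_primera_y_tercera_palabra apellido
    else pyTitle apellido
  else if PySem.Chars.startswith (PySem.Chars.upper apellido) "MAC".toList ∧
          (excepciones_mac.map String.toList).contains (pyCapitalize apellido) then
    pyCapitalize apellido
  else if PySem.Chars.startswith (PySem.Chars.upper apellido) "MAC".toList then
    "Mac".toList ++ pyCapitalize (PySem.Chars.slice apellido (some 3) none)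
  else if PySem.Chars.startswith (PySem.Chars.upper apellido) "MC".toList then
    "Mc".toList ++ pyCapitalize (PySem.Chars.slice apellido (some 2) none)
  else if PySem.Chars.startswith apellido "O'".toList then apellido
  else if PySem.Chars.isIn ['-'] apellido then apellido
  else pyTitle apellido

-- A's while loop: state = (remaining tokens, buffer, apellido_actual, resultados)
def pyA_go (partes : List (List Char)) (buffer : List Char)
    (apellido_actual : List (List Char)) (res : List (List Char)) : List (List Char) :=
  match partes with
  | [] =>
    if apellido_actual.isEmpty then res
    else res ++ [PySem.Chars.join [' '] apellido_actual ++ [' ']]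
  | p :: rest =>
    if p = "[Anonymous]".toList then
      -- break: the trailing apellido_actual check still runs
      if apellido_actual.isEmpty then res ++ ["[Anonymous]".toList]
      else res ++ ["[Anonymous]".toList] ++ [PySem.Chars.join [' '] apellido_actual ++ [' ']]
    else
      let buffer := (if buffer ≠ [] then buffer ++ [' '] else buffer) ++ p
      if PySem.Chars.endswith p [','] then
        let apellido := PySem.Chars.slice buffer none (some (-1))
        let apellido_actual := apellido_actual ++ [pyA_formatChain apellido]
        match rest with
        | q :: rest' =>
          if PySem.Chars.endswith q [','] then
            pyA_go (q :: rest') [] [] (res ++ [PySem.Chars.join [' '] apellido_actual ++ [' ']])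
          else
            pyA_go rest' [] []
              (res ++ [PySem.Chars.join [' '] apellido_actual ++ ", ".toList ++ format_iniciales q])
        | [] => pyA_go [] [] [] (res ++ [PySem.Chars.join [' '] apellido_actual ++ [' ']])
      else pyA_go rest buffer apellido_actual res
termination_by partes.length
decreasing_by all_goals (simp; try omega)

def procesar_autores (autores : String) : List String :=
  (pyA_go (PySem.Chars.split₀ autores.toList) [] [] []).map String.ofList

-- ===== PORT B =====
def format_apellido_alt (ap : List Char) : List Char :=
  if prefijos.any (fun pre => PySem.Chars.startswith (PySem.Chars.lower ap) (pre.toList ++ [' '])) then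
    let w := PySem.Chars.split₀ ap
    if 2 < w.length then
      if ¬ PySem.Chars.isIn ['-'] (w.getD 2 []) then
        PySem.Chars.join [' ']
          ([pyCapitalize (w.getD 0 []), PySem.Chars.lower (w.getD 1 []), pyCapitalize (w.getD 2 [])] ++ w.drop 3)
      else PySem.Chars.join [' '] w
    else pyTitle ap
  else if PySem.Chars.startswith (PySem.Chars.upper ap) "MAC".toList then
    let cap := pyCapitalize ap
    if (excepciones_mac.map String.toList).contains cap then cap
    else "Mac".toList ++ pyCapitalize (PySem.Chars.slice ap (some 3) none)
  else if PySem.Chars.startswith (PySem.Chars.upper ap) "MC".toList then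
    "Mc".toList ++ pyCapitalize (PySem.Chars.slice ap (some 2) none)
  else if PySem.Chars.startswith ap "O'".toList || PySem.Chars.isIn ['-'] ap then ap
  else pyTitle ap

-- phase 1: cut the token stream into records: none = [Anonymous] marker (stops the scan),
-- some (surname, initials?) = one finished author
def pyB_phase1 (toks : List (List Char)) (buf : List Char) :
    List (Option (List Char × Option (List Char))) :=
  match toks with
  | [] => []
  | t :: rest =>
    if t = "[Anonymous]".toList then [none]
    else
      let buf := if buf.isEmpty then t else buf ++ [' '] ++ t
      if PySem.Chars.endswith t [','] then
        let surname := PySem.Chars.slice buf none (some (-1))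
        match rest with
        | q :: rest' =>
          if PySem.Chars.endswith q [','] then some (surname, none) :: pyB_phase1 (q :: rest') []
          else some (surname, some q) :: pyB_phase1 rest' []
        | [] => [some (surname, none)]
      else pyB_phase1 rest buf
termination_by toks.length
decreasing_by all_goals (simp; try omega)

-- phase 2: format one record
def pyB_render (r : Option (List Char × Option (List Char))) : List Char :=
  match r with
  | none => "[Anonymous]".toList
  | some (s, none) => format_apellido_alt s ++ [' ']
  | some (s, some ini) =>
      format_apellido_alt s ++ ", ".toList ++ PySem.Chars.join ['.'] (ini.map (fun c => [c])) ++ ['.']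

def procesar_autores_alt (autores : String) : List String :=
  ((pyB_phase1 (PySem.Chars.split₀ autores.toList) []).map pyB_render).map String.ofList

-- ===== PRECONDITION & SPEC =====
def Spec_procesar_autores (autores : String) (out : List String) : Prop := out = procesar_autores_alt autores
instance (autores : String) (out : List String) : Decidable (Spec_procesar_autores autores out) := by unfold Spec_procesar_autores; infer_instance

-- ===== CLAIM (what is proved, stated in full; the proofs are below) =====
def Claim_equal_procesar_autores : Prop := ∀ (autores : String), Dom_procesar_autores autores → Spec_procesar_autores autores (procesar_autores autores)

-- ===== LEMMAS AND PROOFS =====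

-- setting indices 0,1,2 of a (>2)-element list rebuilds its first three elements
lemma set_set_set_eq {α : Type} (w : List α) (a b c : α) (h : 2 < w.length) :
    ((w.set 0 a).set 1 b).set 2 c = [a, b, c] ++ w.drop 3 := by
  match w, h with
  | x :: y :: z :: t, _ => simp

-- A's inline formatting chain computes B's format helper
lemma formatChain_eq (ap : List Char) : pyA_formatChain ap = format_apellido_alt ap := by
  unfold pyA_formatChain format_apellido_alt capitalizar_primera_y_tercera_palabra
  by_cases hpre : prefijos.any (fun pre => PySem.Chars.startswith (PySem.Chars.lower ap) (pre.toList ++ [' '])) = true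
  · simp only [hpre, if_true]
    by_cases hlen : 2 < (PySem.Chars.split₀ ap).length
    · simp only [hlen, if_true]
      split_ifs with hdash <;> first | (rw [set_set_set_eq _ _ _ _ hlen]; try rfl) | rfl
    · simp [hlen]
  · simp only [hpre, Bool.false_eq_true, if_false]
    split_ifs <;> first | rfl | tauto | simp_all

-- A's buffer update equals B's buffer update
lemma buffer_step (buf t : List Char) :
    (if buf ≠ [] then buf ++ [' '] else buf) ++ t = if buf.isEmpty then t else buf ++ [' '] ++ t := by
  by_cases h : buf = [] <;> simp [h]

-- main invariant: A's loop (with empty apellido_actual — its value at every loop top)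
-- renders exactly the records B's phase 1 produces from the same buffer
lemma pyA_go_eq (n : Nat) : ∀ (parts : List (List Char)) (buf : List Char) (res : List (List Char)),
    parts.length ≤ n →
    pyA_go parts buf [] res = res ++ ((pyB_phase1 parts buf).map pyB_render) := by
  induction n with
  | zero =>
    intro parts buf res h
    have : parts = [] := List.eq_nil_of_length_eq_zero (Nat.le_zero.mp h)
    subst this
    simp [pyA_go, pyB_phase1]
  | succ n ih =>
    intro parts buf res h
    match parts with
    | [] => simp [pyA_go, pyB_phase1]
    | p :: rest =>
      rw [pyA_go, pyB_phase1]
      by_cases hanon : p = "[Anonymous]".toList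
      · simp [hanon, pyB_render]
      · simp only [hanon, if_false]
        by_cases hcom : PySem.Chars.endswith p [','] = true
        · simp only [hcom, if_true]
          rw [buffer_step]
          match rest with
          | [] =>
            simp [pyA_go, pyB_render, formatChain_eq, PySem.Chars.join_singleton]
          | q :: rest' =>
            by_cases hq : PySem.Chars.endswith q [','] = true
            · simp only [hq, if_true]
              rw [ih _ _ _ (by simp at h ⊢; omega)]
              simp [pyB_render, formatChain_eq, PySem.Chars.join_singleton]
            · simp only [hq, Bool.false_eq_true, if_false]
              rw [ih _ _ _ (by simp at h ⊢; omega)]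
              simp [pyB_render, formatChain_eq, format_iniciales, PySem.Chars.join_singleton]
        · simp only [hcom, Bool.false_eq_true, if_false]
          rw [buffer_step]
          exact ih _ _ _ (by simp at h ⊢; omega)

-- ===== VERDICT (by name: the statement is the Claim_ definition above) =====
theorem procesar_autores_spec : Claim_equal_procesar_autores := by
  intro autores _
  unfold Spec_procesar_autores procesar_autores procesar_autores_alt
  rw [pyA_go_eq (PySem.Chars.split₀ autores.toList).length _ _ _ le_rfl]
  simp
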